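-- pv_equiv track=rewrite | github.com/m1sterzer0/DaveProgrammingCompetitions | arc/python/arc126/arc126_C.py | solve
-- ===== SOURCE A (Python) =====
-- def solve(N,K,A) :
--     ## First check if we can make all of the entries equal to A[-1]
--     A.sort()
--     Amax = A[-1]
--     if Amax*N - sum(A) <= K :
--         leftover = K - (Amax*N - sum(A))
--         return Amax + leftover//N
--     ## Now, we know that the soluton is less than A[-1]
--     ## MAIN KEY: calculate the number of increments necessary to make x divide all of the Ai efficiently
--     ## Precalculate an array of the number of elements in A <= X and the sum of the elements in A <= x
--     cumnum = [0] * (Amax+1)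
--     cumsum = [0] * (Amax+1)
--     for a in A : cumnum[a] += 1; cumsum[a] += a
--     for i in range(1,Amax+1) : cumnum[i] += cumnum[i-1]; cumsum[i] += cumsum[i-1]
--     def cost(x) :
--         res = 0
--         for k in range(1_000_000_000) :
--             lo,hi = k*x+1,(k+1)*x; hiidx = min(A[-1],hi)
--             num = cumnum[hiidx] - cumnum[hi-x]
--             ss  = cumsum[hiidx] - cumsum[hi-x]
--             res += num*hi - ss
--             if cumnum[hiidx] == N : return res
--     for x in range(A[-1],-1,-1) :
--         if cost(x) <= K : return x
-- ===== SOURCE B (Python) =====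
-- def solve(N, K, A):
--     # Same observable mutation as A: sort A in place.
--     A.sort()
--     Amax = A[-1]
--     deficit = Amax * N - sum(A)
--     if deficit <= K:
--         return Amax + (K - deficit) // N
--     # Scan candidates downward; cost(x) is computed directly per element:
--     # (-a) % x is the number of +1 increments needed to lift a to a multiple of x.
--     for x in range(Amax, 0, -1):
--         if sum((-a) % x for a in A) <= K:
--             return x
-- ===== Notes on version B (the rewrite author's own statement) =====
-- stated objective: simpler
-- what changed: Drops A's cumulative-count/cumulative-sum tables and block-wise cost() entirely: B computes the cost of a candidate x directly as sum((-a) % x for a in A) and scans x from max(A) down to 1 (x=1 always succeeds, so A's x=0 case is never needed).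
-- outside the precondition, e.g. on solve(2, 4, [-2, 3]): A returns 1, B returns 3
import Mathlib
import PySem

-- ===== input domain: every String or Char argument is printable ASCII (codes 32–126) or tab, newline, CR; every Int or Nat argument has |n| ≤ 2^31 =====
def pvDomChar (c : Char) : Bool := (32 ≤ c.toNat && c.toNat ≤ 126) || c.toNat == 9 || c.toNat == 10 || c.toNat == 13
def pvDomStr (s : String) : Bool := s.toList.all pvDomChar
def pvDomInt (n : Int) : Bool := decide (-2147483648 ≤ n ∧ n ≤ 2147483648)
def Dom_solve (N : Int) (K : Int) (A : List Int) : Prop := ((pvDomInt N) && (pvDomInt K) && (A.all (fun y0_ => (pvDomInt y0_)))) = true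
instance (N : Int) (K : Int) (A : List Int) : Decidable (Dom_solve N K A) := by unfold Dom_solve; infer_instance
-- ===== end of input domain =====

-- B replaces A's cumulative tables and block-wise cost() by a direct per-element
-- cost sum (simpler, not faster).  A sorts its list argument in place; the
-- equivalence proved here is about the RETURN value (B performs the same sort).

-- ===== PORT A =====
-- Python list read / write at an Int index (indices are in range under Pre_solve)
def pvGetI (l : List Int) (i : Int) : Int := PySem.List.pyGetD l i 0
def pvUpdI (l : List Int) (i : Int) (v : Int) : List Int := PySem.List.pySetD l i v

-- cost's inner loop "for k in range(1_000_000_000): …" (fuel = remaining iterations;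
-- on exhaustion Python's cost returns None and the caller raises — outside Pre_solve)
def pvCostLoop (cumnum cumsum : List Int) (N Amax x : Int) : Nat → Int → Int → Int
  | 0, _, res => res
  | fuel+1, k, res =>
      let hi := (k+1)*x
      let hiidx := min Amax hi
      let num := pvGetI cumnum hiidx - pvGetI cumnum (hi - x)
      let ss := pvGetI cumsum hiidx - pvGetI cumsum (hi - x)
      let res' := res + (num*hi - ss)
      if pvGetI cumnum hiidx = N then res'
      else pvCostLoop cumnum cumsum N Amax x fuel (k+1) res'

def pvCost (cumnum cumsum : List Int) (N Amax x : Int) : Int :=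
  pvCostLoop cumnum cumsum N Amax x 1000000000 0 0

-- "for x in range(A[-1], -1, -1): if cost(x) <= K: return x" (falling through the
-- loop makes Python return None — outside Pre_solve; the port then yields 0)
def pvFindLoop (cumnum cumsum : List Int) (N K Amax : Int) : List Int → Int
  | [] => 0
  | x :: rest =>
      if pvCost cumnum cumsum N Amax x ≤ K then x
      else pvFindLoop cumnum cumsum N K Amax rest

def solve (N : Int) (K : Int) (A : List Int) : Int :=
  let As := PySem.List.sorted A (fun a => a) false
  let Amax := PySem.List.pyGetD As (-1) 0
  if Amax * N - As.sum ≤ K then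
    let leftover := K - (Amax * N - As.sum)
    Amax + PySem.Int.floordiv leftover N
  else
    let init : List Int := List.replicate (Amax+1).toNat 0
    let cs := As.foldl (fun (p : List Int × List Int) a =>
        (pvUpdI p.1 a (pvGetI p.1 a + 1), pvUpdI p.2 a (pvGetI p.2 a + a))) (init, init)
    let cs2 := (PySem.List.pyRange 1 (Amax+1) 1).foldl (fun (p : List Int × List Int) i =>
        (pvUpdI p.1 i (pvGetI p.1 i + pvGetI p.1 (i-1)),
         pvUpdI p.2 i (pvGetI p.2 i + pvGetI p.2 (i-1)))) cs
    pvFindLoop cs2.1 cs2.2 N K Amax (PySem.List.pyRange Amax (-1) (-1))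

-- ===== PORT B =====
-- cost(x) computed directly: (-a) % x increments lift a to the next multiple of x
def pvCostAlt (As : List Int) (x : Int) : Int :=
  (As.map (fun a => PySem.Int.mod (-a) x)).sum

-- "for x in range(Amax, 0, -1): if … <= K: return x" (the loop always returns at
-- x = 1 under Pre_solve; an empty scan list yields the port default 0)
def pvScanAlt (As : List Int) (K : Int) : List Int → Int
  | [] => 0
  | x :: rest => if pvCostAlt As x ≤ K then x else pvScanAlt As K rest

def solve_alt (N : Int) (K : Int) (A : List Int) : Int :=
  let As := PySem.List.sorted A (fun a => a) false
  let Amax := PySem.List.pyGetD As (-1) 0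
  let deficit := Amax * N - As.sum
  if deficit ≤ K then Amax + PySem.Int.floordiv (K - deficit) N
  else pvScanAlt As K (PySem.List.pyRange Amax 0 (-1))

-- ===== PRECONDITION & SPEC =====
-- Pre_solve: the inputs on which A returns normally and its value is not an indexing
-- accident.  The first disjunct is A's first branch (max(A)*N - sum(A) <= K, stated
-- with an explicit maximum witness m), where A returns for any K and any elements;
-- N = 0 is excluded there (ZeroDivisionError).  Otherwise A enters its search branch,
-- where the second disjunct excludes: K < 0, N ≠ len(A) or max(A) > 10^9 (cost() then
-- exhausts its 10^9-iteration range, returns None and "cost(x) <= K" raises TypeError,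
-- or the x-loop falls through and A returns None), and negative elements, where
-- "cumnum[a] += 1" silently wraps to the end of the table and A returns an
-- accidental value (see the cite in claim.json).  Empty A raises IndexError.
def Pre_solve (N : Int) (K : Int) (A : List Int) : Prop :=
  A ≠ [] ∧
  ((N ≠ 0 ∧ ∃ m ∈ A, (∀ b ∈ A, b ≤ m) ∧ m * N - A.sum ≤ K) ∨
   (0 ≤ K ∧ (∀ a ∈ A, 0 ≤ a ∧ a ≤ 1000000000) ∧ N = (A.length : Int)))
instance (N : Int) (K : Int) (A : List Int) : Decidable (Pre_solve N K A) := by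
  unfold Pre_solve; infer_instance

def pvWitness_solve : Int × Int × List Int := (3, 2, [1, 2, 3])

def Spec_solve (N : Int) (K : Int) (A : List Int) (out : Int) : Prop := out = solve_alt N K A
instance (N : Int) (K : Int) (A : List Int) (out : Int) : Decidable (Spec_solve N K A out) := by
  unfold Spec_solve; infer_instance

-- ===== CLAIM (what is proved, stated in full; the proofs are below) =====
def Claim_equal_solve : Prop := ∀ (N : Int) (K : Int) (A : List Int),
  Dom_solve N K A → Pre_solve N K A → Spec_solve N K A (solve N K A)

-- ===== LEMMAS AND PROOFS =====

-- Proof-side abbreviations: Nat-indexed read; count / sum of the elements ≤ t;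
-- B-style cost restricted to the elements ≤ t; per-value count and sum
def pvG (l : List Int) (j : Nat) : Int := l.getD j 0
def pvCnt (As : List Int) (t : Int) : Int := ((As.filter (fun a => a ≤ t)).length : Int)
def pvSm (As : List Int) (t : Int) : Int := (As.filter (fun a => a ≤ t)).sum
def pvS (As : List Int) (x t : Int) : Int :=
  ((As.filter (fun a => a ≤ t)).map (fun a => PySem.Int.mod (-a) x)).sum
def pvCntEq (As : List Int) (j : Nat) : Int := ((As.filter (fun a => a = (j : Int))).length : Int)
def pvSmEq (As : List Int) (j : Nat) : Int := (As.filter (fun a => a = (j : Int))).sum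

theorem pvGetI_nonneg (l : List Int) (i : Int) (h : 0 ≤ i) : pvGetI l i = pvG l i.toNat := by
  unfold pvGetI pvG
  rw [show i = ((i.toNat : Nat) : Int) by omega, PySem.List.pyGetD_natCast]
  congr 2
  omega

theorem pvUpdI_nonneg (l : List Int) (i : Int) (v : Int) (h : 0 ≤ i) :
    pvUpdI l i v = l.set i.toNat v := by
  unfold pvUpdI; exact PySem.List.pySetD_of_nonneg l v h

theorem pvG_set (l : List Int) (j m : Nat) (v : Int) (hj : j < l.length) :
    pvG (l.set j v) m = if m = j then v else pvG l m := by
  unfold pvG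
  rcases eq_or_ne m j with rfl | hne
  · simp [List.getD_eq_getElem?_getD, hj]
  · simp [List.getD_eq_getElem?_getD, List.getElem?_set_ne (Ne.symm hne), hne]

theorem pvG_replicate (n : Nat) (j : Nat) : pvG (List.replicate n (0:Int)) j = 0 := by
  unfold pvG
  rcases lt_or_ge j n with h | h
  · simp [List.getD_eq_getElem?_getD, h]
  · simp [List.getD_eq_getElem?_getD, List.getElem?_eq_none (l := List.replicate n (0:Int)) (by simpa using h)]

theorem pointPhase (Amax : Int) (L : List Int) (hL : ∀ a ∈ L, 0 ≤ a ∧ a ≤ Amax)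
    (p q : List Int) (hp : p.length = (Amax+1).toNat) (hq : q.length = (Amax+1).toNat) :
    (L.foldl (fun (pp : List Int × List Int) a =>
        (pvUpdI pp.1 a (pvGetI pp.1 a + 1), pvUpdI pp.2 a (pvGetI pp.2 a + a))) (p, q)).1.length
        = (Amax+1).toNat ∧
    (L.foldl (fun (pp : List Int × List Int) a =>
        (pvUpdI pp.1 a (pvGetI pp.1 a + 1), pvUpdI pp.2 a (pvGetI pp.2 a + a))) (p, q)).2.length
        = (Amax+1).toNat ∧
    ∀ j : Nat, (j : Int) ≤ Amax →
      pvG (L.foldl (fun (pp : List Int × List Int) a =>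
        (pvUpdI pp.1 a (pvGetI pp.1 a + 1), pvUpdI pp.2 a (pvGetI pp.2 a + a))) (p, q)).1 j
        = pvG p j + pvCntEq L j ∧
      pvG (L.foldl (fun (pp : List Int × List Int) a =>
        (pvUpdI pp.1 a (pvGetI pp.1 a + 1), pvUpdI pp.2 a (pvGetI pp.2 a + a))) (p, q)).2 j
        = pvG q j + pvSmEq L j := by
  induction L generalizing p q with
  | nil => refine ⟨hp, hq, ?_⟩; intro j hj; simp [pvCntEq, pvSmEq]
  | cons a L ih =>
    have ha := hL a (by simp)
    have haN : a.toNat < p.length := by rw [hp]; omega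
    have haN' : a.toNat < q.length := by rw [hq]; omega
    simp only [List.foldl_cons]
    rw [pvUpdI_nonneg _ _ _ ha.1, pvUpdI_nonneg _ _ _ ha.1]
    have hp' : (p.set a.toNat (pvGetI p a + 1)).length = (Amax+1).toNat := by simp [hp]
    have hq' : (q.set a.toNat (pvGetI q a + a)).length = (Amax+1).toNat := by simp [hq]
    obtain ⟨h1, h2, h3⟩ := ih (fun b hb => hL b (by simp [hb])) _ _ hp' hq'
    refine ⟨h1, h2, ?_⟩
    intro j hj
    obtain ⟨e1, e2⟩ := h3 j hj
    rw [e1, e2, pvG_set _ _ _ _ haN, pvG_set _ _ _ _ haN']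
    rw [pvGetI_nonneg _ _ ha.1, pvGetI_nonneg _ _ ha.1]
    have hcnt : pvCntEq (a :: L) j = (if a = (j:Int) then 1 else 0) + pvCntEq L j := by
      simp only [pvCntEq, List.filter_cons]
      by_cases h : a = (j:Int)
      · simp [h]; omega
      · simp [h]
    have hsm : pvSmEq (a :: L) j = (if a = (j:Int) then a else 0) + pvSmEq L j := by
      simp only [pvSmEq, List.filter_cons]
      by_cases h : a = (j:Int) <;> simp [h]
    rw [hcnt, hsm]
    by_cases hje : j = a.toNat
    · have haj : a = (j : Int) := by omega
      refine ⟨?_, ?_⟩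
      · rw [if_pos hje, if_pos haj, hje]; ring
      · rw [if_pos hje, if_pos haj, hje]; ring
    · have haj : ¬ (a = (j : Int)) := by omega
      refine ⟨?_, ?_⟩
      · rw [if_neg hje, if_neg haj]; ring
      · rw [if_neg hje, if_neg haj]; ring

theorem prefixPhase (p q : List Int) (hq : q.length = p.length) (m : Nat) (hm : m < p.length) :
    ((PySem.List.pyRange 1 ((m:Int)+1) 1).foldl (fun (pp : List Int × List Int) i =>
        (pvUpdI pp.1 i (pvGetI pp.1 i + pvGetI pp.1 (i-1)),
         pvUpdI pp.2 i (pvGetI pp.2 i + pvGetI pp.2 (i-1)))) (p, q)).1.length = p.length ∧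
    ((PySem.List.pyRange 1 ((m:Int)+1) 1).foldl (fun (pp : List Int × List Int) i =>
        (pvUpdI pp.1 i (pvGetI pp.1 i + pvGetI pp.1 (i-1)),
         pvUpdI pp.2 i (pvGetI pp.2 i + pvGetI pp.2 (i-1)))) (p, q)).2.length = p.length ∧
    (∀ j : Nat, j ≤ m →
      pvG ((PySem.List.pyRange 1 ((m:Int)+1) 1).foldl (fun (pp : List Int × List Int) i =>
        (pvUpdI pp.1 i (pvGetI pp.1 i + pvGetI pp.1 (i-1)),
         pvUpdI pp.2 i (pvGetI pp.2 i + pvGetI pp.2 (i-1)))) (p, q)).1 j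
        = ((List.range (j+1)).map (pvG p)).sum ∧
      pvG ((PySem.List.pyRange 1 ((m:Int)+1) 1).foldl (fun (pp : List Int × List Int) i =>
        (pvUpdI pp.1 i (pvGetI pp.1 i + pvGetI pp.1 (i-1)),
         pvUpdI pp.2 i (pvGetI pp.2 i + pvGetI pp.2 (i-1)))) (p, q)).2 j
        = ((List.range (j+1)).map (pvG q)).sum) ∧
    (∀ j : Nat, m < j →
      pvG ((PySem.List.pyRange 1 ((m:Int)+1) 1).foldl (fun (pp : List Int × List Int) i =>
        (pvUpdI pp.1 i (pvGetI pp.1 i + pvGetI pp.1 (i-1)),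
         pvUpdI pp.2 i (pvGetI pp.2 i + pvGetI pp.2 (i-1)))) (p, q)).1 j = pvG p j ∧
      pvG ((PySem.List.pyRange 1 ((m:Int)+1) 1).foldl (fun (pp : List Int × List Int) i =>
        (pvUpdI pp.1 i (pvGetI pp.1 i + pvGetI pp.1 (i-1)),
         pvUpdI pp.2 i (pvGetI pp.2 i + pvGetI pp.2 (i-1)))) (p, q)).2 j = pvG q j) := by
  induction m with
  | zero =>
    rw [show ((0:Nat):Int)+1 = 1 by norm_num, PySem.List.pyRange_one_eq_nil (by omega)]
    simp only [List.foldl_nil]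
    refine ⟨by simp, hq, ?_, ?_⟩
    · intro j hj; interval_cases j; simp
    · intro j hj; simp
  | succ m ih =>
    have hm' : m < p.length := by omega
    obtain ⟨h1, h2, h3, h4⟩ := ih hm'
    have hsplit : PySem.List.pyRange 1 ((m:Int)+1+1) 1
        = PySem.List.pyRange 1 ((m:Int)+1) 1 ++ [(m:Int)+1] := by
      rw [PySem.List.pyRange_one_succ_right (by omega)]
    rw [show (((m+1:Nat)):Int)+1 = ((m:Int)+1)+1 by push_cast; ring, hsplit, List.foldl_append]
    set r := (PySem.List.pyRange 1 ((m:Int)+1) 1).foldl (fun (pp : List Int × List Int) i =>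
        (pvUpdI pp.1 i (pvGetI pp.1 i + pvGetI pp.1 (i-1)),
         pvUpdI pp.2 i (pvGetI pp.2 i + pvGetI pp.2 (i-1)))) (p, q) with hr
    simp only [List.foldl_cons, List.foldl_nil]
    have hnn : (0:Int) ≤ (m:Int)+1 := by omega
    have htn : ((m:Int)+1).toNat = m+1 := by omega
    have hlt : m+1 < r.1.length := by rw [h1]; omega
    have hlt2 : m+1 < r.2.length := by rw [h2]; omega
    rw [pvUpdI_nonneg _ _ _ hnn, pvUpdI_nonneg _ _ _ hnn,
        pvGetI_nonneg _ _ hnn, pvGetI_nonneg _ _ hnn,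
        pvGetI_nonneg _ _ (by omega : (0:Int) ≤ (m:Int)+1-1),
        pvGetI_nonneg _ _ (by omega : (0:Int) ≤ (m:Int)+1-1),
        show ((m:Int)+1-1).toNat = m by omega, htn]
    refine ⟨by simpa using h1, by simpa using h2, ?_, ?_⟩
    · intro j hj
      rw [pvG_set _ _ _ _ hlt, pvG_set _ _ _ _ hlt2]
      by_cases hje : j = m+1
      · subst hje
        obtain ⟨u1, u2⟩ := h4 (m+1) (by omega)
        obtain ⟨v1, v2⟩ := h3 m (by omega)
        rw [if_pos rfl, if_pos rfl, u1, u2, v1, v2,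
            List.range_succ (n := m+1), List.map_append, List.sum_append]
        constructor <;> simp <;> ring
      · have hj' : j ≤ m := by omega
        obtain ⟨v1, v2⟩ := h3 j hj'
        rw [if_neg hje, if_neg hje, v1, v2]; simp
    · intro j hj
      obtain ⟨u1, u2⟩ := h4 j (by omega)
      rw [pvG_set _ _ _ _ hlt, pvG_set _ _ _ _ hlt2,
          if_neg (by omega : ¬ j = m+1), if_neg (by omega : ¬ j = m+1), u1, u2]
      simp

theorem cnt_split (L : List Int) (j : Nat) :
    pvCnt L ((j:Int)+1) = pvCnt L (j:Int) + pvCntEq L (j+1) := by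
  induction L with
  | nil => simp [pvCnt, pvCntEq]
  | cons a L ih =>
    simp only [pvCnt, pvCntEq, List.filter_cons, Nat.cast_add, Nat.cast_one] at *
    by_cases h1 : a ≤ (j:Int)
    · by_cases h2 : a = (j:Int)+1
      · omega
      · simp only [h1, h2, show a ≤ (j:Int)+1 by omega, decide_true, decide_false,
          if_true, List.length_cons]
        push_cast at ih ⊢
        omega
    · by_cases h2 : a = (j:Int)+1
      · simp only [h2, show ((j:Int)+1 ≤ (j:Int)+1) by omega,
          show ¬((j:Int)+1 ≤ (j:Int)) by omega, decide_true, decide_false,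
          if_true, List.length_cons]
        push_cast at ih ⊢
        omega
      · simp only [h1, h2, show ¬ a ≤ (j:Int)+1 by omega, decide_false]
        exact ih

theorem sm_split (L : List Int) (j : Nat) :
    pvSm L ((j:Int)+1) = pvSm L (j:Int) + pvSmEq L (j+1) := by
  induction L with
  | nil => simp [pvSm, pvSmEq]
  | cons a L ih =>
    simp only [pvSm, pvSmEq, List.filter_cons, Nat.cast_add, Nat.cast_one] at *
    by_cases h1 : a ≤ (j:Int)
    · by_cases h2 : a = (j:Int)+1
      · omega
      · simp only [h1, h2, show a ≤ (j:Int)+1 by omega, decide_true, decide_false,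
          if_true, List.sum_cons]
        push_cast at ih ⊢
        omega
    · by_cases h2 : a = (j:Int)+1
      · simp only [h2, show ((j:Int)+1 ≤ (j:Int)+1) by omega,
          show ¬((j:Int)+1 ≤ (j:Int)) by omega, decide_true, decide_false,
          if_true, List.sum_cons]
        push_cast at ih ⊢
        omega
      · simp only [h1, h2, show ¬ a ≤ (j:Int)+1 by omega, decide_false]
        exact ih

theorem cnt_sum_range (L : List Int) (hL : ∀ a ∈ L, 0 ≤ a) (j : Nat) :
    ((List.range (j+1)).map (fun t => pvCntEq L t)).sum = pvCnt L (j:Int) := by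
  induction j with
  | zero =>
    simp only [List.range_succ, List.range_zero, List.map_nil, List.map_cons, List.nil_append,
      List.sum_cons, List.sum_nil, add_zero, zero_add]
    unfold pvCntEq pvCnt
    congr 1
    exact congrArg List.length (List.filter_congr (fun a ha =>
      decide_eq_decide.mpr (by have := hL a ha; push_cast; omega)))
  | succ j ih =>
    rw [List.range_succ, List.map_append, List.sum_append, ih]
    simp only [List.map_cons, List.map_nil, List.sum_cons, List.sum_nil, add_zero]
    rw [show ((j+1:Nat):Int) = (j:Int)+1 by push_cast; ring, cnt_split]

theorem sm_sum_range (L : List Int) (hL : ∀ a ∈ L, 0 ≤ a) (j : Nat) :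
    ((List.range (j+1)).map (fun t => pvSmEq L t)).sum = pvSm L (j:Int) := by
  induction j with
  | zero =>
    simp only [List.range_succ, List.range_zero, List.map_nil, List.map_cons, List.nil_append,
      List.sum_cons, List.sum_nil, add_zero, zero_add]
    unfold pvSmEq pvSm
    exact congrArg List.sum (List.filter_congr (fun a ha =>
      decide_eq_decide.mpr (by have := hL a ha; push_cast; omega)))
  | succ j ih =>
    rw [List.range_succ, List.map_append, List.sum_append, ih]
    simp only [List.map_cons, List.map_nil, List.sum_cons, List.sum_nil, add_zero]
    rw [show ((j+1:Nat):Int) = (j:Int)+1 by push_cast; ring, sm_split]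

theorem roundup_mod (a x k : Int) (hx : 0 < x) (h1 : k*x < a) (h2 : a ≤ (k+1)*x) :
    PySem.Int.mod (-a) x = (k+1)*x - a := by
  have hkx : (k+1)*x = k*x + x := by ring
  rw [PySem.Int.mod_eq_emod_of_pos hx]
  have h3 : (-a) % x = ((k+1)*x - a) % x := by
    conv_lhs => rw [show -a = (k+1)*x - a + (-(k+1))*x by ring]
    exact Int.add_mul_emod_self_right _ _ _
  rw [h3, Int.emod_eq_of_lt (by omega) (by omega)]

theorem block_sum (As : List Int) (Amax x k : Int) (hx : 0 < x)
    (hA : ∀ a ∈ As, 0 ≤ a ∧ a ≤ Amax) :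
    (pvCnt As (min Amax ((k+1)*x)) - pvCnt As (k*x)) * ((k+1)*x)
      - (pvSm As (min Amax ((k+1)*x)) - pvSm As (k*x))
    = pvS As x ((k+1)*x) - pvS As x (k*x) := by
  induction As with
  | nil => simp [pvCnt, pvSm, pvS]
  | cons a L ih =>
    have ha := hA a (by simp)
    have ihL := ih (fun b hb => hA b (by simp [hb]))
    have hkx : (k+1)*x = k*x + x := by ring
    simp only [pvCnt, pvSm, pvS, List.filter_cons] at *
    have hmin : (a ≤ min Amax ((k+1)*x)) ↔ a ≤ (k+1)*x := by
      constructor <;> intro h <;> omega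
    by_cases hak : a ≤ k*x
    · have c1 : a ≤ (k+1)*x := by omega
      have c2 : a ≤ min Amax ((k+1)*x) := hmin.mpr c1
      simp only [hak, c1, c2, decide_true, if_true, List.length_cons, List.sum_cons,
        List.map_cons]
      push_cast at ihL ⊢
      linarith [ihL]
    · by_cases hhi : a ≤ (k+1)*x
      · have c2 : a ≤ min Amax ((k+1)*x) := hmin.mpr hhi
        simp only [hak, hhi, c2, decide_true, decide_false, if_true,
          List.length_cons, List.sum_cons, List.map_cons]
        have hru : PySem.Int.mod (-a) x = (k+1)*x - a :=
          roundup_mod a x k hx (by omega) hhi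
        push_cast at ihL ⊢
        rw [hru]
        linarith [ihL]
      · have c2 : ¬ a ≤ min Amax ((k+1)*x) := fun h => hhi (hmin.mp h)
        simp only [hak, hhi, c2, decide_false]
        exact ihL

theorem pvCnt_full (As : List Int) (t : Int) (h : ∀ a ∈ As, a ≤ t) :
    pvCnt As t = (As.length : Int) := by
  unfold pvCnt
  rw [List.filter_eq_self.mpr (fun a ha => by simpa using h a ha)]

theorem pvS_full (As : List Int) (x t : Int) (h : ∀ a ∈ As, a ≤ t) :
    pvS As x t = pvCostAlt As x := by
  unfold pvS pvCostAlt
  rw [List.filter_eq_self.mpr (fun a ha => by simpa using h a ha)]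

theorem pvCnt_lt (As : List Int) (t b : Int) (hb : b ∈ As) (ht : t < b) :
    pvCnt As t < (As.length : Int) := by
  unfold pvCnt
  have : (As.filter (fun a => a ≤ t)).length < As.length := by
    apply List.length_filter_lt_length_iff_exists.mpr
    exact ⟨b, hb, by simpa using (by omega : ¬ b ≤ t)⟩
  exact_mod_cast this

theorem pvS_zero (As : List Int) (x : Int) (hA : ∀ a ∈ As, 0 ≤ a) :
    pvS As x 0 = 0 := by
  unfold pvS
  apply List.sum_eq_zero
  intro v hv
  obtain ⟨a, ha, rfl⟩ := List.mem_map.mp hv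
  have h0 : 0 ≤ a := hA a (List.mem_of_mem_filter ha)
  have h1 : a ≤ 0 := by simpa using List.of_mem_filter ha
  have : a = 0 := by omega
  subst this
  simp [PySem.Int.mod]

theorem cost_loop_eq (As c1 c2 : List Int) (N Amax x : Int)
    (hx : 0 < x)
    (hA : ∀ a ∈ As, 0 ≤ a ∧ a ≤ Amax) (hmem : Amax ∈ As)
    (hN : N = (As.length : Int))
    (H1 : ∀ i : Int, 0 ≤ i → i ≤ Amax → pvGetI c1 i = pvCnt As i)
    (H2 : ∀ i : Int, 0 ≤ i → i ≤ Amax → pvGetI c2 i = pvSm As i) :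
    ∀ (fuel : Nat) (k res : Int), 0 ≤ k → k*x < Amax →
      Amax ≤ k + (fuel : Int) → res = pvS As x (k*x) →
      pvCostLoop c1 c2 N Amax x fuel k res = pvCostAlt As x := by
  have hAmax0 : 0 ≤ Amax := (hA Amax hmem).1
  intro fuel
  induction fuel with
  | zero =>
    intro k res hk hlt hfu _
    exfalso
    have : k ≤ k*x := by nlinarith
    omega
  | succ fuel ih =>
    intro k res hk hlt hfu hres
    have hhi0 : 0 < (k+1)*x := by positivity
    have hhiidx0 : 0 ≤ min Amax ((k+1)*x) := by omega
    have hhiidxA : min Amax ((k+1)*x) ≤ Amax := min_le_left _ _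
    have hkx0 : 0 ≤ k*x := by positivity
    have hsub : (k+1)*x - x = k*x := by ring
    simp only [pvCostLoop, hsub]
    rw [H1 _ hhiidx0 hhiidxA, H1 _ hkx0 (le_of_lt hlt),
        H2 _ hhiidx0 hhiidxA, H2 _ hkx0 (le_of_lt hlt)]
    have hblock := block_sum As Amax x k hx hA
    by_cases hterm : Amax ≤ (k+1)*x
    · have hmineq : min Amax ((k+1)*x) = Amax := min_eq_left hterm
      have hcntN : pvCnt As (min Amax ((k+1)*x)) = N := by
        rw [hmineq, pvCnt_full As Amax (fun a ha => (hA a ha).2), hN]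
      rw [if_pos hcntN, hres, hblock]
      have : pvS As x ((k+1)*x) = pvCostAlt As x :=
        pvS_full As x _ (fun a ha => le_trans (hA a ha).2 hterm)
      linarith [this]
    · have hmineq : min Amax ((k+1)*x) = (k+1)*x := min_eq_right (by omega)
      have hcntN : ¬ pvCnt As (min Amax ((k+1)*x)) = N := by
        rw [hmineq, hN]
        have := pvCnt_lt As ((k+1)*x) Amax hmem (by omega)
        omega
      rw [if_neg hcntN]
      have h1 : (0:Int) ≤ k + 1 := by omega
      have h2 : (k+1)*x < Amax := by omega
      have h3 : Amax ≤ (k+1) + (fuel : Int) := by push_cast at hfu ⊢; omega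
      have h4 : res + ((pvCnt As (min Amax ((k+1)*x)) - pvCnt As (k*x)) * ((k+1)*x)
          - (pvSm As (min Amax ((k+1)*x)) - pvSm As (k*x))) = pvS As x ((k+1)*x) := by
        rw [hblock, hres]; ring
      rw [h4]
      exact ih (k+1) _ h1 h2 h3 rfl

theorem costAlt_one (As : List Int) : pvCostAlt As 1 = 0 := by
  unfold pvCostAlt
  apply List.sum_eq_zero
  intro v hv
  obtain ⟨a, _, rfl⟩ := List.mem_map.mp hv
  rw [PySem.Int.mod_eq_emod_of_pos (by omega)]
  exact Int.emod_one _

theorem scan_eq (c1 c2 As : List Int) (N K Amax : Int) (hK : 0 ≤ K)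
    (hcost : ∀ x : Int, 1 ≤ x → x ≤ Amax → pvCost c1 c2 N Amax x = pvCostAlt As x) :
    ∀ (n : Nat) (t : Int), t.toNat = n → 1 ≤ t → t ≤ Amax →
      pvFindLoop c1 c2 N K Amax (PySem.List.pyRange t (-1) (-1))
        = pvScanAlt As K (PySem.List.pyRange t 0 (-1)) := by
  intro n
  induction n using Nat.strong_induction_on with
  | _ n ih =>
    intro t hn ht1 htA
    rw [PySem.List.pyRange_neg_one_cons (by omega : (-1:Int) < t),
        PySem.List.pyRange_neg_one_cons (by omega : (0:Int) < t)]
    simp only [pvFindLoop, pvScanAlt]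
    rw [hcost t ht1 htA]
    by_cases hle : pvCostAlt As t ≤ K
    · rw [if_pos hle, if_pos hle]
    · rw [if_neg hle, if_neg hle]
      have ht2 : 2 ≤ t := by
        rcases eq_or_lt_of_le ht1 with h | h
        · exfalso; rw [← h] at hle; exact hle (by rw [costAlt_one]; exact hK)
        · omega
      exact ih (t-1).toNat (by omega) (t-1) rfl (by omega) (by omega)

theorem sorted_last_ub (A : List Int) (hne : PySem.List.sorted A (fun a => a) false ≠ []) :
    ∀ a ∈ PySem.List.sorted A (fun a => a) false,
      a ≤ (PySem.List.sorted A (fun a => a) false).getLast hne := by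
  intro a ha
  obtain ⟨p, hp, hpa⟩ := List.mem_iff_getElem.mp ha
  rw [List.getLast_eq_getElem, ← hpa]
  exact PySem.List.sorted_id_getElem_mono A (by omega) (by omega)

theorem main_eq (N K : Int) (A : List Int)
    (hpre : A ≠ [] ∧
      ((N ≠ 0 ∧ ∃ m ∈ A, (∀ b ∈ A, b ≤ m) ∧ m * N - A.sum ≤ K) ∨
       (0 ≤ K ∧ (∀ a ∈ A, 0 ≤ a ∧ a ≤ 1000000000) ∧ N = (A.length : Int)))) :
    solve N K A = solve_alt N K A := by
  obtain ⟨hne, hdisj⟩ := hpre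
  unfold solve solve_alt
  simp only []
  set As := PySem.List.sorted A (fun a => a) false with hAs
  have hperm : As.Perm A := PySem.List.sorted_perm A _ _
  have hnsne : As ≠ [] := by
    intro h; exact hne ((PySem.List.sorted_eq_nil_iff A _ _).mp h)
  have hAmaxdef : PySem.List.pyGetD As (-1) 0 = As.getLast hnsne :=
    PySem.List.pyGetD_neg_one As 0 hnsne
  set Amax := PySem.List.pyGetD As (-1) 0 with hAmax
  have hmem : Amax ∈ As := by rw [hAmaxdef]; exact List.getLast_mem hnsne
  have hub : ∀ a ∈ As, a ≤ Amax := by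
    rw [hAmaxdef]; exact sorted_last_ub A hnsne
  have hsum : As.sum = A.sum := hperm.sum_eq
  by_cases hbr : Amax * N - As.sum ≤ K
  · rw [if_pos hbr, if_pos hbr]
  · rw [if_neg hbr, if_neg hbr]
    -- we are in the search branch: the first disjunct of Pre_ is impossible
    have hmain : 0 ≤ K ∧ (∀ a ∈ A, 0 ≤ a ∧ a ≤ 1000000000) ∧ N = (A.length : Int) := by
      rcases hdisj with ⟨_, m, hmA, hmub, hcond⟩ | h
      · exfalso
        have h1 : m ≤ Amax := hub m (hperm.mem_iff.mpr hmA)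
        have h2 : Amax ≤ m := hmub Amax (hperm.mem_iff.mp hmem)
        have hme : m = Amax := le_antisymm h1 h2
        rw [hme, ← hsum] at hcond
        exact hbr hcond
      · exact h
    obtain ⟨hK, hbnd, hNlen⟩ := hmain
    have hnnAs : ∀ a ∈ As, 0 ≤ a := fun a ha => (hbnd a (hperm.mem_iff.mp ha)).1
    have hAmax0 : 0 ≤ Amax := hnnAs Amax hmem
    have hN : N = (As.length : Int) := by
      rw [hNlen, PySem.List.length_sorted]
    have hbound : Amax ≤ 1000000000 := (hbnd Amax (hperm.mem_iff.mp hmem)).2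
    have hA : ∀ a ∈ As, 0 ≤ a ∧ a ≤ Amax := fun a ha => ⟨hnnAs a ha, hub a ha⟩
    -- Amax ≥ 1 in this branch
    have hAmax1 : 1 ≤ Amax := by
      by_contra h
      have hz : Amax = 0 := by omega
      have hall0 : ∀ a ∈ As, a = 0 := by
        intro a ha; have := hA a ha; omega
      have : As.sum = 0 := List.sum_eq_zero hall0
      rw [hz] at hbr
      apply hbr
      rw [this]
      simpa using hK
    -- characterize the tables
    set init : List Int := List.replicate (Amax+1).toNat 0 with hinit
    have hlen0 : init.length = (Amax+1).toNat := by rw [hinit]; exact List.length_replicate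
    obtain ⟨hc1len, hc2len, hcval⟩ := pointPhase Amax As hA init init hlen0 hlen0
    set cs := As.foldl (fun (p : List Int × List Int) a =>
        (pvUpdI p.1 a (pvGetI p.1 a + 1), pvUpdI p.2 a (pvGetI p.2 a + a))) (init, init) with hcs
    have hrange : PySem.List.pyRange 1 (Amax+1) 1
        = PySem.List.pyRange 1 ((Amax.toNat : Int)+1) 1 := by
      rw [Int.toNat_of_nonneg hAmax0]
    have hmlt : Amax.toNat < cs.1.length := by rw [hc1len]; omega
    have hqlen : cs.2.length = cs.1.length := by rw [hc1len, hc2len]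
    obtain ⟨hd1len, hd2len, hdval, _⟩ := prefixPhase cs.1 cs.2 hqlen Amax.toNat hmlt
    rw [hrange]
    set cs2 := (PySem.List.pyRange 1 ((Amax.toNat : Int)+1) 1).foldl
        (fun (p : List Int × List Int) i =>
          (pvUpdI p.1 i (pvGetI p.1 i + pvGetI p.1 (i-1)),
           pvUpdI p.2 i (pvGetI p.2 i + pvGetI p.2 (i-1)))) cs with hcs2
    have H1 : ∀ i : Int, 0 ≤ i → i ≤ Amax → pvGetI cs2.1 i = pvCnt As i := by
      intro i h0 hle
      rw [pvGetI_nonneg _ _ h0]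
      obtain ⟨e1, _⟩ := hdval i.toNat (by omega)
      rw [e1]
      have : ∀ t ∈ List.range (i.toNat+1), pvG cs.1 t = pvCntEq As t := by
        intro t ht
        have htle : (t:Int) ≤ Amax := by
          have := List.mem_range.mp ht; omega
        obtain ⟨f1, _⟩ := hcval t htle
        rw [f1, pvG_replicate]; ring
      rw [List.map_congr_left this, cnt_sum_range As hnnAs i.toNat,
          show ((i.toNat : Nat) : Int) = i by omega]
    have H2 : ∀ i : Int, 0 ≤ i → i ≤ Amax → pvGetI cs2.2 i = pvSm As i := by
      intro i h0 hle
      rw [pvGetI_nonneg _ _ h0]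
      obtain ⟨_, e2⟩ := hdval i.toNat (by omega)
      rw [e2]
      have : ∀ t ∈ List.range (i.toNat+1), pvG cs.2 t = pvSmEq As t := by
        intro t ht
        have htle : (t:Int) ≤ Amax := by
          have := List.mem_range.mp ht; omega
        obtain ⟨_, f2⟩ := hcval t htle
        rw [f2, pvG_replicate]; ring
      rw [List.map_congr_left this, sm_sum_range As hnnAs i.toNat,
          show ((i.toNat : Nat) : Int) = i by omega]
    -- costs agree
    have hcost : ∀ x : Int, 1 ≤ x → x ≤ Amax →
        pvCost cs2.1 cs2.2 N Amax x = pvCostAlt As x := by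
      intro x hx1 hx2
      unfold pvCost
      apply cost_loop_eq As cs2.1 cs2.2 N Amax x (by omega) hA hmem hN H1 H2
      · omega
      · simpa using hAmax1
      · push_cast; omega
      · rw [show (0:Int)*x = 0 by ring, pvS_zero As x hnnAs]
    exact scan_eq cs2.1 cs2.2 As N K Amax hK hcost Amax.toNat Amax rfl hAmax1 le_rfl

-- ===== VERDICT (by name: the statement is the Claim_ definition above) =====
theorem solve_spec : Claim_equal_solve := by
  intro N K A _ hpre
  unfold Pre_solve at hpre
  unfold Spec_solve
  exact main_eq N K A hpre
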